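-- pv_equiv track=rewrite | github.com/mmfoodchicks/Jim | QuietRiftEnigma/Tools/EditorScripts/qr_retarget_anims_to_mannequin.py | _pick_bone
-- ===== SOURCE A (Python) =====
-- def _pick_bone(bone_names, token_list):
--     """Find the first bone whose lowercased name contains any of the tokens."""
--     if not bone_names or not token_list:
--         return None
--     lowered = [(n, n.lower()) for n in bone_names]
--     for token in token_list:
--         t = token.lower()
--         # Prefer exact match, then suffix, then substring.
--         for orig, lc in lowered:
--             if lc == t:
--                 return orig
--         for orig, lc in lowered:
--             if lc.endswith("_" + t) or lc.endswith(t):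
--                 return orig
--         for orig, lc in lowered:
--             if t in lc:
--                 return orig
--     return None
-- ===== SOURCE B (Python) =====
-- def _pick_bone(bone_names, token_list):
--     """Find the first bone whose lowercased name contains any of the tokens.
--
--     Single pass per token: return on exact match immediately, while recording
--     the first suffix-match and first substring-match candidates."""
--     if not bone_names or not token_list:
--         return None
--     lowered = [(n, n.lower()) for n in bone_names]
--     for token in token_list:
--         t = token.lower()
--         suffix = None
--         substr = None
--         for orig, lc in lowered:
--             if lc == t:
--                 return orig
--             if suffix is None and (lc.endswith("_" + t) or lc.endswith(t)):
--                 suffix = orig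
--             if substr is None and t in lc:
--                 substr = orig
--         if suffix is not None:
--             return suffix
--         if substr is not None:
--             return substr
--     return None
-- ===== Notes on version B (the rewrite author's own statement) =====
-- stated objective: alternative
-- what changed: Replaces A's three separate full scans of the bone list per token with a single pass that returns on exact match and maintains ranked first-suffix/first-substring candidates.
import Mathlib
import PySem

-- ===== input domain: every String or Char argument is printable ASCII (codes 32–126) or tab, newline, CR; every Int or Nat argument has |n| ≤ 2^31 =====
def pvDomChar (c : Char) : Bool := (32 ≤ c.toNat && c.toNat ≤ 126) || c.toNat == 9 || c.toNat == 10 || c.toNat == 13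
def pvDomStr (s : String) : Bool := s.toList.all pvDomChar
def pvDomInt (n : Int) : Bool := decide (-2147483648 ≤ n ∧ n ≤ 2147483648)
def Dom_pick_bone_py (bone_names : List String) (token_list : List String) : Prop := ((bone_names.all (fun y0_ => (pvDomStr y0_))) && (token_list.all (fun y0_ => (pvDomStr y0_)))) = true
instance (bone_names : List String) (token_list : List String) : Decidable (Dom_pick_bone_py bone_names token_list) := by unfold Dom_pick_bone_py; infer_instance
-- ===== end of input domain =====

-- B replaces A's three separate full scans of the bone list per token with a single
-- pass that returns on exact match and records first-suffix/first-substring candidates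
-- (alternative decomposition, same asymptotic cost).


-- the three per-token predicates (shared spellings of the identical Python tests)
def pbExact (t : String) (q : String × String) : Bool := q.2 == t
def pbSuffix (t : String) (q : String × String) : Bool :=
  PySem.Str.endswith q.2 ("_" ++ t) || PySem.Str.endswith q.2 t
def pbSub (t : String) (q : String × String) : Bool := PySem.Str.isIn t q.2

-- ===== PORT A =====
-- outer 'for token in token_list' with three full scans (each inner loop is find?)
def pickALoop (lowered : List (String × String)) : List String → Option String
  | [] => none
  | token :: rest =>
    let t := PySem.Str.lower token
    match lowered.find? (pbExact t) with
    | some q => some q.1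
    | none =>
      match lowered.find? (pbSuffix t) with
      | some q => some q.1
      | none =>
        match lowered.find? (pbSub t) with
        | some q => some q.1
        | none => pickALoop lowered rest

def pick_bone_py (bone_names : List String) (token_list : List String) : Option String :=
  if bone_names.isEmpty || token_list.isEmpty then none
  else pickALoop (bone_names.map (fun n => (n, PySem.Str.lower n))) token_list

-- ===== PORT B =====
-- single pass per token: early return on exact, accumulate first suffix / substring candidates
def pickBScan (t : String) : List (String × String) → Option String → Option String → Option String
  | [], suffix, substr => suffix.or substr
  | q :: rest, suffix, substr =>
    if q.2 == t then some q.1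
    else
      pickBScan t rest
        (if suffix.isNone && pbSuffix t q then some q.1 else suffix)
        (if substr.isNone && pbSub t q then some q.1 else substr)

def pickBLoop (lowered : List (String × String)) : List String → Option String
  | [] => none
  | token :: rest =>
    let t := PySem.Str.lower token
    match pickBScan t lowered none none with
    | some r => some r
    | none => pickBLoop lowered rest

def pick_bone_py_alt (bone_names : List String) (token_list : List String) : Option String :=
  if bone_names.isEmpty || token_list.isEmpty then none
  else pickBLoop (bone_names.map (fun n => (n, PySem.Str.lower n))) token_list

-- ===== PRECONDITION & SPEC =====
def Spec_pick_bone_py (bone_names : List String) (token_list : List String) (out : Option String) : Prop := out = pick_bone_py_alt bone_names token_list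
instance (bone_names : List String) (token_list : List String) (out : Option String) : Decidable (Spec_pick_bone_py bone_names token_list out) := by unfold Spec_pick_bone_py; infer_instance

-- ===== CLAIM (what is proved, stated in full; the proofs are below) =====
def Claim_equal_pick_bone_py : Prop := ∀ (bone_names : List String) (token_list : List String), Dom_pick_bone_py bone_names token_list → Spec_pick_bone_py bone_names token_list (pick_bone_py bone_names token_list)

-- ===== LEMMAS AND PROOFS =====

-- invariant of B's single pass: it equals exact-find, else suffix candidate-or-find, else substring
theorem pickBScan_eq (t : String) (l : List (String × String))
    (suffix substr : Option String) :
    pickBScan t l suffix substr =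
      match l.find? (pbExact t) with
      | some q => some q.1
      | none =>
        (suffix.or ((l.find? (pbSuffix t)).map Prod.fst)).or
          (substr.or ((l.find? (pbSub t)).map Prod.fst)) := by
  induction l generalizing suffix substr with
  | nil => simp [pickBScan]
  | cons q rest ih =>
    by_cases he : q.2 == t
    · simp [pickBScan, List.find?, pbExact, he]
    · simp only [pickBScan, he, if_false, ih]
      have hx : (pbExact t q) = false := by simpa [pbExact] using he
      simp only [List.find?, hx]
      cases hsf : suffix with
      | some s => simp [Option.or]
      | none =>
        cases hsb : substr with
        | some s =>
          by_cases h2 : pbSuffix t q <;> simp [h2, Option.or]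
        | none =>
          by_cases h2 : pbSuffix t q <;> by_cases h3 : pbSub t q <;>
            simp [h2, h3, Option.or]

theorem pickLoop_eq (lowered : List (String × String)) (tokens : List String) :
    pickALoop lowered tokens = pickBLoop lowered tokens := by
  induction tokens with
  | nil => rfl
  | cons token rest ih =>
    simp only [pickALoop, pickBLoop, pickBScan_eq, ih, Option.or]
    cases lowered.find? (pbExact (PySem.Str.lower token)) with
    | some q => rfl
    | none =>
      cases lowered.find? (pbSuffix (PySem.Str.lower token)) with
      | some q => rfl
      | none =>
        cases lowered.find? (pbSub (PySem.Str.lower token)) with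
        | some q => rfl
        | none => rfl

-- ===== VERDICT (by name: the statement is the Claim_ definition above) =====
theorem pick_bone_py_spec : Claim_equal_pick_bone_py := by
  intro bone_names token_list _
  unfold Spec_pick_bone_py pick_bone_py pick_bone_py_alt
  split
  · rfl
  · exact pickLoop_eq _ _
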